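-- pv_equiv track=rewrite | github.com/takutosquare00-max/jlpt-kakunin-test | Minnanonihongo/shared/fukushu_lead_unit31.py | fukushu_top_lead_for_range
-- ===== SOURCE A (Python) =====
-- def _fukushu_q_kind(q: int) -> str:
--     """復習通し番号（1…40）に対応する設問タイプ（リード文切り替え用）。"""
--     if 1 <= q <= 14 or 20 <= q <= 24:
--         return "ikou"
--     if 15 <= q <= 19:
--         return "kaiwa"
--     if 25 <= q <= 28:
--         return "bun_omo"
--     if 29 <= q <= 32:
--         return "bun_tsumori"
--     if 33 <= q <= 36:
--         return "hyou"
--     if 37 <= q <= 40: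
--         return "dokkai"
--     return "ikou"
--
-- def _dedupe_consecutive_lines(lines: list[str]) -> list[str]:
--     out: list[str] = []
--     for line in lines:
--         if not out or out[-1] != line:
--             out.append(line)
--     return out
--
-- FUKUSHU_LEAD_FRAGMENTS: dict[str, str] = {
--     "ikou": (
--         "「〜ます」の<ruby>形<rt>かたち</rt></ruby>に<ruby>対応<rt>たいおう</rt></ruby>する"
--         "<ruby>意向形<rt>いこうけい</rt></ruby>を<ruby>選<rt>えら</rt></ruby>びましょう。"
--     ),
--     "kaiwa": (
--         "<ruby>会話<rt>かいわ</rt></ruby>の（　）に<ruby>入<rt>はい</rt></ruby>る"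
--         "<ruby>正<rt>ただ</rt></ruby>しいものはどれですか。"
--     ),
--     "bun_omo": (
--         "<ruby>文<rt>ぶん</rt></ruby>の（　）に<ruby>入<rt>はい</rt></ruby>る"
--         "<ruby>正<rt>ただ</rt></ruby>しいものを<ruby>選<rt>えら</rt></ruby>びましょう。"
--     ),
--     "bun_tsumori": (
--         "<ruby>文<rt>ぶん</rt></ruby>の（　）に<ruby>入<rt>はい</rt></ruby>る"
--         "<ruby>正<rt>ただ</rt></ruby>しいものを<ruby>選<rt>えら</rt></ruby>びましょう。"
--     ),
--     "hyou": (
--         "<ruby>表<rt>ひょう</rt></ruby>の<ruby>内容<rt>ないよう</rt></ruby>に"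
--         "<ruby>合<rt>あ</rt></ruby>う<ruby>答<rt>こた</rt></ruby>えを<ruby>選<rt>えら</rt></ruby>びましょう。"
--     ),
--     "dokkai": (
--         "<ruby>読<rt>よ</rt></ruby>んだ<ruby>文章<rt>ぶんしょう</rt></ruby>の<ruby>内容<rt>ないよう</rt></ruby>に"
--         "<ruby>合<rt>あ</rt></ruby>うものを<ruby>選<rt>えら</rt></ruby>びましょう。"
--     ),
-- }
--
-- def fukushu_top_lead_for_range(f_lo: int, f_hi: int) -> str:
--     """
--     パート先頭に置くリード（表・読解ブロックは別途、本文の直前に挿入するため除外）。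
--     """
--     seen: list[str] = []
--     prev: str | None = None
--     for q in range(f_lo, f_hi + 1):
--         k = _fukushu_q_kind(q)
--         if k != prev:
--             seen.append(k)
--             prev = k
--     top = [k for k in seen if k not in ("hyou", "dokkai")]
--     if not top:
--         return ""
--     lines = _dedupe_consecutive_lines([FUKUSHU_LEAD_FRAGMENTS[k] for k in top])
--     return "<br>".join(lines)
-- ===== SOURCE B (Python) =====
-- # Segment-table re-implementation: intersect [f_lo, f_hi] (clamped into [0, 41],
-- # the two sentinel rows standing for the out-of-range "ikou" tails) with a fixed
-- # ordered interval table instead of scanning every integer q (boundary walk, not a per-q scan).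
--
-- _SEGMENTS = [
--     (0, 0, "ikou"),
--     (1, 14, "ikou"),
--     (15, 19, "kaiwa"),
--     (20, 24, "ikou"),
--     (25, 28, "bun_omo"),
--     (29, 32, "bun_tsumori"),
--     (33, 36, "hyou"),
--     (37, 40, "dokkai"),
--     (41, 41, "ikou"),
-- ]
--
-- _FRAGMENTS = {
--     "ikou": (
--         "「〜ます」の<ruby>形<rt>かたち</rt></ruby>に<ruby>対応<rt>たいおう</rt></ruby>する"
--         "<ruby>意向形<rt>いこうけい</rt></ruby>を<ruby>選<rt>えら</rt></ruby>びましょう。"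
--     ),
--     "kaiwa": (
--         "<ruby>会話<rt>かいわ</rt></ruby>の（　）に<ruby>入<rt>はい</rt></ruby>る"
--         "<ruby>正<rt>ただ</rt></ruby>しいものはどれですか。"
--     ),
--     "bun_omo": (
--         "<ruby>文<rt>ぶん</rt></ruby>の（　）に<ruby>入<rt>はい</rt></ruby>る"
--         "<ruby>正<rt>ただ</rt></ruby>しいものを<ruby>選<rt>えら</rt></ruby>びましょう。"
--     ),
--     "bun_tsumori": (
--         "<ruby>文<rt>ぶん</rt></ruby>の（　）に<ruby>入<rt>はい</rt></ruby>る"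
--         "<ruby>正<rt>ただ</rt></ruby>しいものを<ruby>選<rt>えら</rt></ruby>びましょう。"
--     ),
--     "hyou": (
--         "<ruby>表<rt>ひょう</rt></ruby>の<ruby>内容<rt>ないよう</rt></ruby>に"
--         "<ruby>合<rt>あ</rt></ruby>う<ruby>答<rt>こた</rt></ruby>えを<ruby>選<rt>えら</rt></ruby>びましょう。"
--     ),
--     "dokkai": (
--         "<ruby>読<rt>よ</rt></ruby>んだ<ruby>文章<rt>ぶんしょう</rt></ruby>の<ruby>内容<rt>ないよう</rt></ruby>に"
--         "<ruby>合<rt>あ</rt></ruby>うものを<ruby>選<rt>えら</rt></ruby>びましょう。"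
--     ),
-- }
--
--
-- def _collapse(items):
--     out = []
--     for x in items:
--         if not out or out[-1] != x:
--             out.append(x)
--     return out
--
--
-- def fukushu_top_lead_for_range(f_lo: int, f_hi: int) -> str:
--     if f_lo > f_hi:
--         return ""
--     lo = min(max(f_lo, 0), 41)
--     hi = min(max(f_hi, 0), 41)
--     kinds = _collapse(k for a, b, k in _SEGMENTS if a <= hi and b >= lo)
--     lines = _collapse(_FRAGMENTS[k] for k in kinds if k not in ("hyou", "dokkai"))
--     return "<br>".join(lines)
-- ===== Notes on version B (the rewrite author's own statement) =====
-- stated objective: alternative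
-- what changed: Instead of scanning every integer q in [f_lo, f_hi] and classifying each, B clamps the range into [0,41] and intersects it with a fixed ordered segment table (sentinel rows standing for the out-of-range ikou tails), then collapses, filters, maps and joins; intended as faster on wide ranges (measured 36.67x at n=262144 but inconsistent across input shapes).
import Mathlib
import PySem

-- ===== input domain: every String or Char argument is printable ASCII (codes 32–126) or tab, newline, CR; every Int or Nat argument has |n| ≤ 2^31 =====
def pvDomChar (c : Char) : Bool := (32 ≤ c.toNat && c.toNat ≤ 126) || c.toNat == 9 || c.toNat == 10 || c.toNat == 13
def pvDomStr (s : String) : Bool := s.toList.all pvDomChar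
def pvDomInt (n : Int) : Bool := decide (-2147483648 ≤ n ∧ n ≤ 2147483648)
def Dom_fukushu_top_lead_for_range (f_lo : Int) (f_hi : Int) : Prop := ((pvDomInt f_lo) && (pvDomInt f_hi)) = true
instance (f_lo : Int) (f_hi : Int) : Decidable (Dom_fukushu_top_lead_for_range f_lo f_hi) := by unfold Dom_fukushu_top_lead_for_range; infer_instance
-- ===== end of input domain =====

-- B replaces A's per-integer scan of [f_lo, f_hi] by intersecting the clamped range with a fixed segment table (alternative decomposition).

-- ===== PORT A =====

-- _fukushu_q_kind
def pvKind (q : Int) : String :=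
  if (1 ≤ q ∧ q ≤ 14) ∨ (20 ≤ q ∧ q ≤ 24) then "ikou"
  else if 15 ≤ q ∧ q ≤ 19 then "kaiwa"
  else if 25 ≤ q ∧ q ≤ 28 then "bun_omo"
  else if 29 ≤ q ∧ q ≤ 32 then "bun_tsumori"
  else if 33 ≤ q ∧ q ≤ 36 then "hyou"
  else if 37 ≤ q ∧ q ≤ 40 then "dokkai"
  else "ikou"

-- FUKUSHU_LEAD_FRAGMENTS (dict; every key looked up is present, so getD's default is never used)
def pvFrag (k : String) : String :=
  PySem.Dict.getD
    (PySem.Dict.ofList [("ikou", "「〜ます」の<ruby>形<rt>かたち</rt></ruby>に<ruby>対応<rt>たいおう</rt></ruby>する<ruby>意向形<rt>いこうけい</rt></ruby>を<ruby>選<rt>えら</rt></ruby>びましょう。"),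
     ("kaiwa", "<ruby>会話<rt>かいわ</rt></ruby>の（　）に<ruby>入<rt>はい</rt></ruby>る<ruby>正<rt>ただ</rt></ruby>しいものはどれですか。"),
     ("bun_omo", "<ruby>文<rt>ぶん</rt></ruby>の（　）に<ruby>入<rt>はい</rt></ruby>る<ruby>正<rt>ただ</rt></ruby>しいものを<ruby>選<rt>えら</rt></ruby>びましょう。"),
     ("bun_tsumori", "<ruby>文<rt>ぶん</rt></ruby>の（　）に<ruby>入<rt>はい</rt></ruby>る<ruby>正<rt>ただ</rt></ruby>しいものを<ruby>選<rt>えら</rt></ruby>びましょう。"),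
     ("hyou", "<ruby>表<rt>ひょう</rt></ruby>の<ruby>内容<rt>ないよう</rt></ruby>に<ruby>合<rt>あ</rt></ruby>う<ruby>答<rt>こた</rt></ruby>えを<ruby>選<rt>えら</rt></ruby>びましょう。"),
     ("dokkai", "<ruby>読<rt>よ</rt></ruby>んだ<ruby>文章<rt>ぶんしょう</rt></ruby>の<ruby>内容<rt>ないよう</rt></ruby>に<ruby>合<rt>あ</rt></ruby>うものを<ruby>選<rt>えら</rt></ruby>びましょう。")])
    k ""

-- _dedupe_consecutive_lines
def pvDedupe (lines : List String) : List String :=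
  lines.foldl (fun out line => if out = [] ∨ out.getLast? ≠ some line then out ++ [line] else out) []

def fukushu_top_lead_for_range (f_lo : Int) (f_hi : Int) : String :=
  let st := (PySem.List.pyRange f_lo (f_hi + 1) 1).foldl
    (fun (s : List String × Option String) q =>
      let k := pvKind q
      if s.2 ≠ some k then (s.1 ++ [k], some k) else s)
    ([], none)
  let top := st.1.filter (fun k => ¬ (k = "hyou" ∨ k = "dokkai"))
  if top = [] then ""
  else PySem.Str.join "<br>" (pvDedupe (top.map pvFrag))

-- ===== PORT B =====

def pvSegs : List (Int × Int × String) :=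
  [(0, 0, "ikou"), (1, 14, "ikou"), (15, 19, "kaiwa"), (20, 24, "ikou"),
   (25, 28, "bun_omo"), (29, 32, "bun_tsumori"), (33, 36, "hyou"),
   (37, 40, "dokkai"), (41, 41, "ikou")]

-- _collapse
def pvCollapse (items : List String) : List String :=
  items.foldl (fun out x => if out = [] ∨ out.getLast? ≠ some x then out ++ [x] else out) []

def fukushu_top_lead_for_range_alt (f_lo : Int) (f_hi : Int) : String :=
  if f_lo > f_hi then ""
  else
    let lo := min (max f_lo 0) 41
    let hi := min (max f_hi 0) 41
    let kinds := pvCollapse (pvSegs.filterMap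
      (fun s => if s.1 ≤ hi ∧ lo ≤ s.2.1 then some s.2.2 else none))
    let lines := pvCollapse
      ((kinds.filter (fun k => ¬ (k = "hyou" ∨ k = "dokkai"))).map pvFrag)
    PySem.Str.join "<br>" lines

-- ===== PRECONDITION & SPEC =====
def Spec_fukushu_top_lead_for_range (f_lo : Int) (f_hi : Int) (out : String) : Prop := out = fukushu_top_lead_for_range_alt f_lo f_hi
instance (f_lo : Int) (f_hi : Int) (out : String) : Decidable (Spec_fukushu_top_lead_for_range f_lo f_hi out) := by unfold Spec_fukushu_top_lead_for_range; infer_instance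

-- ===== CLAIM (what is proved, stated in full; the proofs are below) =====
def Claim_equal_fukushu_top_lead_for_range : Prop := ∀ (f_lo : Int) (f_hi : Int), Dom_fukushu_top_lead_for_range f_lo f_hi → Spec_fukushu_top_lead_for_range f_lo f_hi (fukushu_top_lead_for_range f_lo f_hi)

-- ===== LEMMAS AND PROOFS =====

-- consecutive dedup, recursively, carrying the previous element
def ddF (p : Option String) : List String → List String
  | [] => []
  | a :: l => if p = some a then ddF p l else a :: ddF (some a) l

theorem elimLast (a : String) (t : List String) (p : Option String) :
    ((a :: t).getLast?).elim p some = ((t.getLast?).elim (some a) some) := by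
  cases t with
  | nil => simp
  | cons b t =>
    rw [List.getLast?_cons_cons]
    cases hgl : (b :: t).getLast? with
    | none => exact absurd (List.getLast?_eq_none_iff.mp hgl) (by simp)
    | some v => simp

-- the entry fold of port A computes ddF of the kind list
theorem fold_int_eq : ∀ (l : List Int) (acc : List String) (p : Option String),
    l.foldl (fun (s : List String × Option String) q =>
        let k := pvKind q
        if s.2 ≠ some k then (s.1 ++ [k], some k) else s) (acc, p)
      = (acc ++ ddF p (l.map pvKind), (((l.map pvKind)).getLast?).elim p some) := by
  intro l
  induction l with
  | nil => intro acc p; simp [ddF]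
  | cons q t ih =>
    intro acc p
    by_cases h : p = some (pvKind q)
    · simp only [List.foldl_cons, List.map_cons]
      rw [if_neg (show ¬ p ≠ some (pvKind q) by simp [h])]
      rw [ih, elimLast, h]
      simp [ddF]
    · simp only [List.foldl_cons, List.map_cons]
      rw [if_pos (show p ≠ some (pvKind q) from h)]
      rw [ih, elimLast]
      simp [ddF, h]

-- the shared consecutive-dedup loop equals ddF
theorem collapse_go : ∀ (l acc : List String),
    l.foldl (fun out x => if out = [] ∨ out.getLast? ≠ some x then out ++ [x] else out) acc
      = acc ++ ddF acc.getLast? l := by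
  intro l
  induction l with
  | nil => intro acc; simp [ddF]
  | cons x t ih =>
    intro acc
    by_cases h : acc.getLast? = some x
    · have hne : acc ≠ [] := by
        intro he; rw [he] at h; simp at h
      simp only [List.foldl_cons]
      rw [show (if acc = [] ∨ acc.getLast? ≠ some x then acc ++ [x] else acc) = acc by
        simp [hne, h]]
      rw [ih]
      simp [ddF, h]
    · simp only [List.foldl_cons]
      rw [show (if acc = [] ∨ acc.getLast? ≠ some x then acc ++ [x] else acc)
          = acc ++ [x] by simp [h]]
      rw [ih]
      simp [ddF, h]

theorem pvCollapse_eq_ddF (l : List String) : pvCollapse l = ddF none l := by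
  unfold pvCollapse; rw [collapse_go]; simp

theorem pvDedupe_eq_ddF (l : List String) : pvDedupe l = ddF none l := by
  unfold pvDedupe; rw [collapse_go]; simp

-- the deduped kind list of A's scan of [lo, hi]
def pvSeen (lo hi : Int) : List String :=
  ddF none ((PySem.List.pyRange lo (hi + 1) 1).map pvKind)

theorem kind_ikou_of_ge (x : Int) (h : 41 ≤ x) : pvKind x = "ikou" := by
  unfold pvKind; split_ifs <;> first | rfl | omega

theorem kind_ikou_of_le (x : Int) (h : x ≤ 0) : pvKind x = "ikou" := by
  unfold pvKind; split_ifs <;> first | rfl | omega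

theorem ddF_ikou_tail : ∀ (l : List Int), (∀ x ∈ l, pvKind x = "ikou") →
    ddF (some "ikou") (l.map pvKind) = [] := by
  intro l
  induction l with
  | nil => intro _; simp [ddF]
  | cons a t ih =>
    intro h
    have ha : pvKind a = "ikou" := h a (by simp)
    simp only [List.map_cons, ddF, ha, if_true]
    exact ih (fun x hx => h x (by simp [hx]))

theorem ddF_ikou_head (a : Int) (t : List Int) (h : ∀ x ∈ a :: t, pvKind x = "ikou") :
    ddF none ((a :: t).map pvKind) = ["ikou"] := by
  have ha : pvKind a = "ikou" := h a (by simp)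
  simp only [List.map_cons, ddF, ha]
  rw [if_neg (by simp)]
  rw [ddF_ikou_tail t (fun x hx => h x (by simp [hx]))]

theorem ddF_append (l₁ l₂ : List String) : ∀ (p : Option String),
    ddF p (l₁ ++ l₂) = ddF p l₁ ++ ddF ((l₁.getLast?).elim p some) l₂ := by
  induction l₁ with
  | nil => intro p; simp [ddF]
  | cons a t ih =>
    intro p
    by_cases h : p = some a
    · simp only [List.cons_append, ddF, if_pos h]
      rw [ih p, elimLast, h]
    · simp only [List.cons_append, ddF, if_neg h]
      rw [ih (some a), elimLast]

-- drop a hi-tail of all-ikou questions (hi ≥ 41)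
theorem pvSeen_clamp_hi (lo hi : Int) (hlo : lo ≤ 41) (hhi : 41 ≤ hi) :
    pvSeen lo hi = pvSeen lo 41 := by
  unfold pvSeen
  rw [PySem.List.pyRange_one_append lo 42 (hi + 1) (by omega) (by omega)]
  rw [List.map_append, ddF_append]
  have hlast : ((PySem.List.pyRange lo 42 1).map pvKind).getLast? = some "ikou" := by
    rw [List.getLast?_map]
    rw [show (42 : Int) = 41 + 1 by norm_num,
        PySem.List.pyRange_one_succ_right hlo]
    simp [kind_ikou_of_ge 41 le_rfl]
  rw [hlast, Option.elim_some]
  rw [ddF_ikou_tail (PySem.List.pyRange 42 (hi + 1) 1) (fun x hx => by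
    have := (PySem.List.mem_pyRange_one.mp hx).1
    exact kind_ikou_of_ge x (by omega))]
  rw [show (42 : Int) = 41 + 1 by norm_num]
  simp

-- drop a lo-head of all-ikou questions (lo ≤ 0 ≤ hi)
theorem pvSeen_clamp_lo (lo hi : Int) (hlo : lo ≤ 0) (hhi : 0 ≤ hi) :
    pvSeen lo hi = pvSeen 0 hi := by
  rcases eq_or_lt_of_le hlo with heq | hlt
  · rw [heq]
  unfold pvSeen
  rw [PySem.List.pyRange_one_append lo 0 (hi + 1) (by omega) (by omega)]
  rw [List.map_append, ddF_append]
  have hne : PySem.List.pyRange lo 0 1 = lo :: PySem.List.pyRange (lo + 1) 0 1 :=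
    PySem.List.pyRange_one_cons hlt
  have hall : ∀ x ∈ PySem.List.pyRange lo 0 1, pvKind x = "ikou" := fun x hx =>
    kind_ikou_of_le x (by have := (PySem.List.mem_pyRange_one.mp hx).2; omega)
  have hhead : ddF none ((PySem.List.pyRange lo 0 1).map pvKind) = ["ikou"] := by
    rw [hne]; exact ddF_ikou_head _ _ (by rw [← hne]; exact hall)
  have hlast : ((PySem.List.pyRange lo 0 1).map pvKind).getLast? = some "ikou" := by
    rw [List.getLast?_map]
    cases hgl : (PySem.List.pyRange lo 0 1).getLast? with
    | none =>
      rw [List.getLast?_eq_none_iff.mp hgl] at hne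
      exact absurd hne (by simp)
    | some v =>
      have hv : v ∈ PySem.List.pyRange lo 0 1 := List.mem_of_getLast? hgl
      simp [hall v hv]
  rw [hlast, hhead, Option.elim_some]
  have h0 : PySem.List.pyRange 0 (hi + 1) 1 = 0 :: PySem.List.pyRange 1 (hi + 1) 1 :=
    PySem.List.pyRange_one_cons (by omega)
  rw [h0]
  simp only [List.map_cons, kind_ikou_of_le 0 le_rfl]
  simp [ddF]

theorem finite_check : ∀ a b : Fin 42, (a : Int) ≤ (b : Int) →
    pvSeen (a : Int) (b : Int)
      = ddF none (pvSegs.filterMap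
          (fun s => if s.1 ≤ (b : Int) ∧ (a : Int) ≤ s.2.1 then some s.2.2 else none)) := by
  decide

-- the shared render tail: filter, map to fragments, dedupe, join
theorem render_eq (s : List String) :
    (if s.filter (fun k => ¬ (k = "hyou" ∨ k = "dokkai")) = [] then ""
     else PySem.Str.join "<br>"
       (pvDedupe ((s.filter (fun k => ¬ (k = "hyou" ∨ k = "dokkai"))).map pvFrag)))
      = PySem.Str.join "<br>"
          (pvCollapse ((s.filter (fun k => ¬ (k = "hyou" ∨ k = "dokkai"))).map pvFrag)) := by
  by_cases h : s.filter (fun k => ¬ (k = "hyou" ∨ k = "dokkai")) = []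
  · rw [if_pos h, h]
    decide
  · rw [if_neg h, pvDedupe_eq_ddF, pvCollapse_eq_ddF]

-- A's deduped kind scan equals B's collapsed segment intersection (clamped bounds)
theorem seen_eq_seg (lo hi : Int) (h : lo ≤ hi) :
    ddF none ((PySem.List.pyRange lo (hi + 1) 1).map pvKind)
      = ddF none (pvSegs.filterMap
          (fun s => if s.1 ≤ min (max hi 0) 41 ∧ min (max lo 0) 41 ≤ s.2.1
                    then some s.2.2 else none)) := by
  rw [show ddF none ((PySem.List.pyRange lo (hi + 1) 1).map pvKind) = pvSeen lo hi from rfl]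
  by_cases hA : hi ≤ 0
  · have hc : PySem.List.pyRange lo (hi + 1) 1 = lo :: PySem.List.pyRange (lo + 1) (hi + 1) 1 :=
      PySem.List.pyRange_one_cons (by omega)
    have hseen : pvSeen lo hi = ["ikou"] := by
      unfold pvSeen
      rw [hc]
      exact ddF_ikou_head _ _ (fun x hx => by
        rw [← hc] at hx
        exact kind_ikou_of_le x (by have := (PySem.List.mem_pyRange_one.mp hx).2; omega))
    rw [hseen, show min (max hi 0) 41 = 0 by omega, show min (max lo 0) 41 = 0 by omega]
    decide
  · by_cases hB : 42 ≤ lo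
    · have hc : PySem.List.pyRange lo (hi + 1) 1 = lo :: PySem.List.pyRange (lo + 1) (hi + 1) 1 :=
        PySem.List.pyRange_one_cons (by omega)
      have hseen : pvSeen lo hi = ["ikou"] := by
        unfold pvSeen
        rw [hc]
        exact ddF_ikou_head _ _ (fun x hx => by
          rw [← hc] at hx
          exact kind_ikou_of_ge x (by have := (PySem.List.mem_pyRange_one.mp hx).1; omega))
      rw [hseen, show min (max hi 0) 41 = 41 by omega, show min (max lo 0) 41 = 41 by omega]
      decide
    · -- interior: clamp both ends, then the finite check
      have hhi1 : 1 ≤ hi := by omega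
      have hlo41 : lo ≤ 41 := by omega
      have step1 : pvSeen lo hi = pvSeen lo (min hi 41) := by
        by_cases h41 : 41 ≤ hi
        · rw [show min hi 41 = 41 by omega]
          exact pvSeen_clamp_hi lo hi hlo41 h41
        · rw [show min hi 41 = hi by omega]
      have step2 : pvSeen lo (min hi 41) = pvSeen (max lo 0) (min hi 41) := by
        by_cases h0 : lo ≤ 0
        · rw [show max lo 0 = 0 by omega]
          exact pvSeen_clamp_lo lo (min hi 41) h0 (by omega)
        · rw [show max lo 0 = lo by omega]
      have ha0 : 0 ≤ max lo 0 := by omega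
      have hab : max lo 0 ≤ min hi 41 := by omega
      have hb41 : min hi 41 ≤ 41 := by omega
      have hfin := finite_check ⟨(max lo 0).toNat, by omega⟩ ⟨(min hi 41).toNat, by omega⟩
        (by simp; omega)
      rw [Int.toNat_of_nonneg ha0, Int.toNat_of_nonneg (by omega : (0:Int) ≤ min hi 41)] at hfin
      rw [step1, step2, hfin,
          show min (max hi 0) 41 = min hi 41 by omega,
          show min (max lo 0) 41 = max lo 0 by omega]

theorem main_eq (lo hi : Int) :
    fukushu_top_lead_for_range lo hi = fukushu_top_lead_for_range_alt lo hi := by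
  unfold fukushu_top_lead_for_range fukushu_top_lead_for_range_alt
  by_cases h : lo ≤ hi
  · rw [if_neg (show ¬ lo > hi by omega)]
    rw [fold_int_eq]
    dsimp only
    rw [List.nil_append]
    rw [render_eq]
    rw [seen_eq_seg lo hi h]
    rw [← pvCollapse_eq_ddF]
  · rw [if_pos (show lo > hi by omega)]
    rw [PySem.List.pyRange_one_eq_nil (by omega)]
    simp

-- ===== VERDICT (by name: the statement is the Claim_ definition above) =====
theorem fukushu_top_lead_for_range_spec : Claim_equal_fukushu_top_lead_for_range := by
  intro lo hi _
  unfold Spec_fukushu_top_lead_for_range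
  exact main_eq lo hi
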